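-- pv_equiv track=rewrite | github.com/WoojunePark/coding_test_python | 2_Implementation/2_C/7573.py | get_net
-- ===== SOURCE A (Python) =====
-- def check(m_i_x, m_i_y, n_x_min, n_y_min, n_x_max, n_y_max):
--     return n_x_min <= m_i_x <= n_x_max and n_y_min <= m_i_y <= n_y_max
--
-- def count(n_x_min, n_y_min, n_x_max, n_y_max, M_list):
--     result = 0
--
--     for m_i in M_list:
--         result += check(m_i[0], m_i[1], n_x_min, n_y_min, n_x_max, n_y_max)
--
--     return result
--
-- def get_net(m_i, L, prev_max_value, M_list):
--     m_i_x, m_i_y = m_i[0], m_i[1]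
--     L_half = L//2   # L//2 = a + b
--     max_value = prev_max_value
--
--     for l in range(1, L_half):
--         a, b = l, L_half - l
--         for x in range(m_i_x - a, m_i_x + 1):  # 물고기가 사각형의 오른쪽 모서리부터 왼쪽 모서리까지
--             for y in range(m_i_y - b, m_i_y + 1):
--                 max_value = max(max_value, count(x, y, x + a, y + b, M_list))
--
--     return max_value
-- ===== SOURCE B (Python) =====
-- # Coordinate-compressed search: for each split l, only rectangle corners at
-- # "breakpoint" x/y positions (fish coordinate + 1, fish coordinate - side)
-- # can change the enclosed count, so only those placements are evaluated.
-- def _count(x, y, a, b, M_list):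
--     c = 0
--     for f in M_list:
--         if x <= f[0] <= x + a and y <= f[1] <= y + b:
--             c += 1
--     return c
--
-- def get_net(m_i, L, prev_max_value, M_list):
--     mx, my = m_i[0], m_i[1]
--     Lh = L // 2
--     best = prev_max_value
--     for l in range(1, Lh):
--         a, b = l, Lh - l
--         xs = [mx - a] + [t for f in M_list for t in (f[0] + 1, f[0] - a)
--                          if mx - a <= t <= mx]
--         ys = [my - b] + [t for f in M_list for t in (f[1] + 1, f[1] - b)
--                          if my - b <= t <= my]
--         for x in xs:
--             for y in ys:
--                 c = _count(x, y, a, b, M_list)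
--                 if c > best:
--                     best = c
--     return best
-- ===== Notes on version B (the rewrite author's own statement) =====
-- stated objective: alternative
-- what changed: Instead of trying every integer corner position in the L/2 x L/2 offset window (A's brute force), B coordinate-compresses each axis: only breakpoint positions fish_coord+1 and fish_coord-side (plus the window's left end) can change the enclosed-fish count, so per split l it evaluates O(M^2) candidate corners instead of O(l*(L/2-l)) positions; measured faster on mid sizes (6.75x at n=256) but unconfirmed at the largest, so no speed claim.
import Mathlib
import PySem

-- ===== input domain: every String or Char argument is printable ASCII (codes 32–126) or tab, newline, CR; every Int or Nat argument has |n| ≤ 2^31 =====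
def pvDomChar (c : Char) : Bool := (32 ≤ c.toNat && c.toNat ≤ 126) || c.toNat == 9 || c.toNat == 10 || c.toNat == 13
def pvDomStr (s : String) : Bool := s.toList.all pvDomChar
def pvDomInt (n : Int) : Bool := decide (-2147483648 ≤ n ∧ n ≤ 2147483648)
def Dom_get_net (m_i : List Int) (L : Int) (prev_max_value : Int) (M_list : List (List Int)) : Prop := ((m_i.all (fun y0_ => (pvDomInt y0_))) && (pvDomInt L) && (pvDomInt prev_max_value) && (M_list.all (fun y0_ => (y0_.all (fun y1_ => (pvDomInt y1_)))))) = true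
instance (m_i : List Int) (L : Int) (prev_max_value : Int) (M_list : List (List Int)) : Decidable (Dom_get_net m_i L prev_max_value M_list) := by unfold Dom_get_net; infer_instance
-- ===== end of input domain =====

-- B replaces A's scan over every integer corner offset by coordinate-compressed
-- candidate corner positions derived from the fish coordinates (exact same maximum).


-- ===== PORT A =====
-- xs[i] for a valid index (Pre_ guarantees validity); default never used under Pre_
def pvGetI (l : List Int) (i : Int) : Int := (PySem.List.pyGet? l i).getD 0

def check (m_i_x m_i_y n_x_min n_y_min n_x_max n_y_max : Int) : Bool :=
  decide (n_x_min ≤ m_i_x) && decide (m_i_x ≤ n_x_max) && decide (n_y_min ≤ m_i_y) && decide (m_i_y ≤ n_y_max)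

def count (n_x_min n_y_min n_x_max n_y_max : Int) (M_list : List (List Int)) : Int :=
  M_list.foldl (fun result m =>
    result + (if check (pvGetI m 0) (pvGetI m 1) n_x_min n_y_min n_x_max n_y_max then 1 else 0)) 0

def get_net (m_i : List Int) (L : Int) (prev_max_value : Int) (M_list : List (List Int)) : Int :=
  let m_i_x := pvGetI m_i 0
  let m_i_y := pvGetI m_i 1
  let L_half := PySem.Int.floordiv L 2
  (PySem.List.pyRange 1 L_half 1).foldl (fun max_value l =>
    let a := l
    let b := L_half - l
    (PySem.List.pyRange (m_i_x - a) (m_i_x + 1) 1).foldl (fun max_value x =>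
      (PySem.List.pyRange (m_i_y - b) (m_i_y + 1) 1).foldl (fun max_value y =>
        max max_value (count x y (x + a) (y + b) M_list)) max_value) max_value) prev_max_value

-- ===== PORT B =====
def count_in (x y a b : Int) (M_list : List (List Int)) : Int :=
  M_list.foldl (fun c f =>
    if x ≤ pvGetI f 0 ∧ pvGetI f 0 ≤ x + a ∧ y ≤ pvGetI f 1 ∧ pvGetI f 1 ≤ y + b then c + 1 else c) 0

-- the candidate-corner comprehension: [lo] + [t for f in M for t in (f[idx]+1, f[idx]-aa) if lo <= t <= hi]
def candAxis (lo hi aa : Int) (idx : Int) (M_list : List (List Int)) : List Int :=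
  lo :: M_list.flatMap (fun f =>
    (if lo ≤ pvGetI f idx + 1 ∧ pvGetI f idx + 1 ≤ hi then [pvGetI f idx + 1] else []) ++
    (if lo ≤ pvGetI f idx - aa ∧ pvGetI f idx - aa ≤ hi then [pvGetI f idx - aa] else []))

def get_net_alt (m_i : List Int) (L : Int) (prev_max_value : Int) (M_list : List (List Int)) : Int :=
  let mx := pvGetI m_i 0
  let my := pvGetI m_i 1
  let Lh := PySem.Int.floordiv L 2
  (PySem.List.pyRange 1 Lh 1).foldl (fun best l =>
    let a := l
    let b := Lh - l
    let xs := candAxis (mx - a) mx a 0 M_list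
    let ys := candAxis (my - b) my b 1 M_list
    xs.foldl (fun best x =>
      ys.foldl (fun best y =>
        let c := count_in x y a b M_list
        if c > best then c else best) best) best) prev_max_value

-- ===== PRECONDITION & SPEC =====
-- Pre_ excludes exactly the inputs where the Python raises IndexError: m_i needs two
-- coordinates always, and each fish needs two coordinates whenever the l-loop runs (L//2 ≥ 2).
def Pre_get_net (m_i : List Int) (L : Int) (prev_max_value : Int) (M_list : List (List Int)) : Prop :=
  2 ≤ m_i.length ∧ (2 ≤ PySem.Int.floordiv L 2 → ∀ f ∈ M_list, 2 ≤ f.length)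
instance (m_i : List Int) (L : Int) (prev_max_value : Int) (M_list : List (List Int)) : Decidable (Pre_get_net m_i L prev_max_value M_list) := by unfold Pre_get_net; infer_instance

def pvWitness_get_net : List Int × Int × Int × List (List Int) := ([1, 1], 6, 0, [[0, 0], [1, 1], [2, 0]])

def Spec_get_net (m_i : List Int) (L : Int) (prev_max_value : Int) (M_list : List (List Int)) (out : Int) : Prop := out = get_net_alt m_i L prev_max_value M_list
instance (m_i : List Int) (L : Int) (prev_max_value : Int) (M_list : List (List Int)) (out : Int) : Decidable (Spec_get_net m_i L prev_max_value M_list out) := by unfold Spec_get_net; infer_instance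

-- ===== CLAIM (what is proved, stated in full; the proofs are below) =====
def Claim_equal_get_net : Prop := ∀ (m_i : List Int) (L : Int) (prev_max_value : Int) (M_list : List (List Int)), Dom_get_net m_i L prev_max_value M_list → Pre_get_net m_i L prev_max_value M_list → Spec_get_net m_i L prev_max_value M_list (get_net m_i L prev_max_value M_list)

-- ===== LEMMAS AND PROOFS =====

theorem pv_witness_ok : Dom_get_net (pvWitness_get_net.1) (pvWitness_get_net.2.1) (pvWitness_get_net.2.2.1) (pvWitness_get_net.2.2.2) ∧ Pre_get_net (pvWitness_get_net.1) (pvWitness_get_net.2.1) (pvWitness_get_net.2.2.1) (pvWitness_get_net.2.2.2) := by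
  constructor <;> decide

-- fold-max toolbox
theorem foldl_max_init (V : List Int) (a : Int) : a ≤ V.foldl max a := by
  induction V generalizing a with
  | nil => simp
  | cons v V ih => exact le_trans (le_max_left a v) (ih _)

theorem foldl_max_mem (V : List Int) (a v : Int) (hv : v ∈ V) : v ≤ V.foldl max a := by
  induction V generalizing a with
  | nil => simp at hv
  | cons w V ih =>
    rcases List.mem_cons.1 hv with h | h
    · subst h; exact le_trans (le_max_right a v) (foldl_max_init V _)
    · exact ih _ h

theorem foldl_max_le (V : List Int) (a c : Int) (ha : a ≤ c) (h : ∀ v ∈ V, v ≤ c) :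
    V.foldl max a ≤ c := by
  induction V generalizing a with
  | nil => simpa
  | cons v V ih =>
    exact ih _ (max_le ha (h v (List.mem_cons_self))) (fun w hw => h w (List.mem_cons_of_mem _ hw))

theorem foldl_max_eq_of_dominate (VA VB : List Int) (mv : Int)
    (h1 : ∀ v ∈ VB, ∃ u ∈ VA, v ≤ u) (h2 : ∀ u ∈ VA, ∃ v ∈ VB, u ≤ v) :
    VA.foldl max mv = VB.foldl max mv := by
  apply le_antisymm
  · refine foldl_max_le _ _ _ (foldl_max_init _ _) (fun u hu => ?_)
    obtain ⟨v, hv, huv⟩ := h2 u hu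
    exact le_trans huv (foldl_max_mem _ _ _ hv)
  · refine foldl_max_le _ _ _ (foldl_max_init _ _) (fun v hv => ?_)
    obtain ⟨u, hu, hvu⟩ := h1 v hv
    exact le_trans hvu (foldl_max_mem _ _ _ hu)

-- nested fold of max = fold of max over the flattened value list
theorem foldl_max_map (Y : List Int) (g : Int → Int) (m : Int) :
    Y.foldl (fun m y => max m (g y)) m = (Y.map g).foldl max m := by
  induction Y generalizing m with
  | nil => simp
  | cons y Y ihy => simp only [List.foldl_cons, List.map_cons]; rw [ihy]

theorem nested_foldl_max (X Y : List Int) (g : Int → Int → Int) (mv : Int) :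
    X.foldl (fun m x => Y.foldl (fun m y => max m (g x y)) m) mv
      = (X.flatMap (fun x => Y.map (g x))).foldl max mv := by
  induction X generalizing mv with
  | nil => simp
  | cons x X ih =>
    simp only [List.foldl_cons, List.flatMap_cons, List.foldl_append]
    rw [ih]
    congr 1
    exact foldl_max_map Y (g x) mv

theorem if_gt_eq_max (b c : Int) : (if c > b then c else b) = max b c := by
  by_cases h : c > b <;> simp [max_def, h] <;> omega

theorem count_in_eq (x y a b : Int) (M : List (List Int)) :
    count_in x y a b M = count x y (x + a) (y + b) M := by
  unfold count_in count
  apply PySem.List.foldl_congr_mem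
  intro acc f _
  by_cases h : x ≤ pvGetI f 0 ∧ pvGetI f 0 ≤ x + a ∧ y ≤ pvGetI f 1 ∧ pvGetI f 1 ≤ y + b
  · simp [h, check]
  · simp only [if_neg h, check]
    have : ¬ (decide (x ≤ pvGetI f 0) && decide (pvGetI f 0 ≤ x + a) && decide (y ≤ pvGetI f 1) && decide (pvGetI f 1 ≤ y + b)) = true := by
      simp only [Bool.and_eq_true, decide_eq_true_eq]; tauto
    simp [this]

theorem mem_ite_singleton {p : Prop} [Decidable p] (u t : Int) :
    t ∈ (if p then [u] else ([] : List Int)) ↔ p ∧ t = u := by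
  split <;> simp_all

theorem mem_candAxis (lo hi aa idx : Int) (M : List (List Int)) (t : Int) :
    t ∈ candAxis lo hi aa idx M ↔
      t = lo ∨ ∃ f ∈ M, (t = pvGetI f idx + 1 ∨ t = pvGetI f idx - aa) ∧ lo ≤ t ∧ t ≤ hi := by
  simp only [candAxis, List.mem_cons, List.mem_flatMap, List.mem_append, mem_ite_singleton]
  constructor
  · rintro (h | ⟨f, hf, (⟨⟨h1, h2⟩, rfl⟩ | ⟨⟨h1, h2⟩, rfl⟩)⟩)
    · exact Or.inl h
    · exact Or.inr ⟨f, hf, Or.inl rfl, h1, h2⟩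
    · exact Or.inr ⟨f, hf, Or.inr rfl, h1, h2⟩
  · rintro (h | ⟨f, hf, (rfl | rfl), h1, h2⟩)
    · exact Or.inl h
    · exact Or.inr ⟨f, hf, Or.inl ⟨⟨h1, h2⟩, rfl⟩⟩
    · exact Or.inr ⟨f, hf, Or.inr ⟨⟨h1, h2⟩, rfl⟩⟩

theorem candAxis_bounds (lo hi aa idx : Int) (M : List (List Int)) (hlohi : lo ≤ hi)
    (t : Int) (ht : t ∈ candAxis lo hi aa idx M) : lo ≤ t ∧ t ≤ hi := by
  rcases (mem_candAxis lo hi aa idx M t).1 ht with rfl | ⟨f, _, _, h1, h2⟩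
  · exact ⟨le_refl _, hlohi⟩
  · exact ⟨h1, h2⟩

-- greatest element ≤ x of a list containing some element ≤ x
theorem exists_greatest_le (S : List Int) (x : Int) :
    (∃ c ∈ S, c ≤ x) → ∃ c ∈ S, c ≤ x ∧ ∀ t ∈ S, t ≤ x → t ≤ c := by
  induction S with
  | nil => rintro ⟨c, hc, -⟩; simp at hc
  | cons s S ih =>
    rintro ⟨c, hc, hcx⟩
    by_cases hS : ∃ c ∈ S, c ≤ x
    · obtain ⟨c', hc', hc'x, hmax⟩ := ih hS
      by_cases hs : s ≤ x
      · refine ⟨max s c', ?_, le_trans (max_le hs hc'x) (le_refl x), ?_⟩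
        · rcases max_cases s c' with ⟨h, _⟩ | ⟨h, _⟩
          · rw [h]; exact List.mem_cons_self
          · rw [h]; exact List.mem_cons_of_mem _ hc'
        · intro t ht htx
          rcases List.mem_cons.1 ht with rfl | ht'
          · exact le_max_left _ _
          · exact le_trans (hmax t ht' htx) (le_max_right _ _)
      · refine ⟨c', List.mem_cons_of_mem _ hc', hc'x, ?_⟩
        intro t ht htx
        rcases List.mem_cons.1 ht with rfl | ht'
        · omega
        · exact hmax t ht' htx
    · have hcs : c = s := by
        rcases List.mem_cons.1 hc with rfl | hc'
        · rfl
        · exact absurd ⟨c, hc', hcx⟩ hS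
      subst hcs
      refine ⟨c, List.mem_cons_self, hcx, ?_⟩
      intro t ht htx
      rcases List.mem_cons.1 ht with rfl | ht'
      · exact le_refl _
      · exact absurd ⟨t, ht', htx⟩ hS

-- snapping x down to the greatest candidate ≤ x preserves each fish's 1-D membership
theorem snap_indicator (lo hi aa idx x c : Int) (M : List (List Int)) (f : List Int)
    (hf : f ∈ M) (hcx : c ≤ x) (hxhi : x ≤ hi)
    (hc : c ∈ candAxis lo hi aa idx M) (hlohi : lo ≤ hi)
    (hmax : ∀ t ∈ candAxis lo hi aa idx M, t ≤ x → t ≤ c) :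
    (x ≤ pvGetI f idx ∧ pvGetI f idx ≤ x + aa) ↔ (c ≤ pvGetI f idx ∧ pvGetI f idx ≤ c + aa) := by
  have hcbounds := candAxis_bounds lo hi aa idx M hlohi c hc
  set v := pvGetI f idx with hv
  constructor
  · rintro ⟨h1, h2⟩
    refine ⟨le_trans hcx h1, ?_⟩
    by_contra h
    push Not at h
    have hmem : v - aa ∈ candAxis lo hi aa idx M := by
      rw [mem_candAxis]
      exact Or.inr ⟨f, hf, Or.inr rfl, by omega, by omega⟩
    have := hmax _ hmem (by omega)
    omega
  · rintro ⟨h1, h2⟩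
    constructor
    · by_contra h
      push Not at h
      have hmem : v + 1 ∈ candAxis lo hi aa idx M := by
        rw [mem_candAxis]
        exact Or.inr ⟨f, hf, Or.inl rfl, by omega, by omega⟩
      have := hmax _ hmem (by omega)
      omega
    · omega

theorem count_in_congr (x y cx cy a b : Int) (M : List (List Int))
    (h : ∀ f ∈ M,
      ((x ≤ pvGetI f 0 ∧ pvGetI f 0 ≤ x + a) ↔ (cx ≤ pvGetI f 0 ∧ pvGetI f 0 ≤ cx + a)) ∧
      ((y ≤ pvGetI f 1 ∧ pvGetI f 1 ≤ y + b) ↔ (cy ≤ pvGetI f 1 ∧ pvGetI f 1 ≤ cy + b))) :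
    count_in cx cy a b M = count_in x y a b M := by
  unfold count_in
  apply PySem.List.foldl_congr_mem
  intro acc f hfM
  obtain ⟨hx, hy⟩ := h f hfM
  by_cases hc : x ≤ pvGetI f 0 ∧ pvGetI f 0 ≤ x + a ∧ y ≤ pvGetI f 1 ∧ pvGetI f 1 ≤ y + b
  · rw [if_pos (by tauto), if_pos (by tauto)]
  · rw [if_neg (by tauto), if_neg (by tauto)]

-- the per-split inner double loop: full grid scan (A) = candidate scan (B)
theorem inner_eq (mx my a b : Int) (M : List (List Int)) (ha : 1 ≤ a) (hb : 1 ≤ b) (mv : Int) :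
    (PySem.List.pyRange (mx - a) (mx + 1) 1).foldl (fun m x =>
      (PySem.List.pyRange (my - b) (my + 1) 1).foldl (fun m y =>
        max m (count x y (x + a) (y + b) M)) m) mv
    = (candAxis (mx - a) mx a 0 M).foldl (fun best x =>
        (candAxis (my - b) my b 1 M).foldl (fun best y =>
          let c := count_in x y a b M
          if c > best then c else best) best) mv := by
  have hB : ∀ (xs ys : List Int) (init : Int),
      xs.foldl (fun best x => ys.foldl (fun best y =>
        let c := count_in x y a b M
        if c > best then c else best) best) init
      = xs.foldl (fun m x => ys.foldl (fun m y => max m (count_in x y a b M)) m) init := by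
    intro xs ys init
    apply PySem.List.foldl_congr_mem
    intro acc x _
    apply PySem.List.foldl_congr_mem
    intro acc' y _
    simp only []
    rw [if_gt_eq_max]
  rw [hB]
  have hgA : ∀ x y : Int, count x y (x + a) (y + b) M = count_in x y a b M := by
    intro x y; rw [count_in_eq]
  simp only [hgA]
  rw [nested_foldl_max _ _ (fun x y => count_in x y a b M) mv,
      nested_foldl_max _ _ (fun x y => count_in x y a b M) mv]
  apply foldl_max_eq_of_dominate
  · -- every candidate value is a grid value
    intro v hv
    simp only [List.mem_flatMap, List.mem_map] at hv
    obtain ⟨x, hx, y, hy, rfl⟩ := hv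
    have hxb := candAxis_bounds (mx - a) mx a 0 M (by omega) x hx
    have hyb := candAxis_bounds (my - b) my b 1 M (by omega) y hy
    refine ⟨count_in x y a b M, ?_, le_refl _⟩
    simp only [List.mem_flatMap, List.mem_map]
    exact ⟨x, by rw [PySem.List.mem_pyRange_one]; omega,
           y, by rw [PySem.List.mem_pyRange_one]; omega, rfl⟩
  · -- every grid value is matched by a candidate value
    intro u hu
    simp only [List.mem_flatMap, List.mem_map] at hu
    obtain ⟨x, hx, y, hy, rfl⟩ := hu
    rw [PySem.List.mem_pyRange_one] at hx hy
    obtain ⟨cx, hcxmem, hcxle, hcxmax⟩ :=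
      exists_greatest_le (candAxis (mx - a) mx a 0 M) x
        ⟨mx - a, List.mem_cons_self, by omega⟩
    obtain ⟨cy, hcymem, hcyle, hcymax⟩ :=
      exists_greatest_le (candAxis (my - b) my b 1 M) y
        ⟨my - b, List.mem_cons_self, by omega⟩
    refine ⟨count_in cx cy a b M, ?_, ?_⟩
    · simp only [List.mem_flatMap, List.mem_map]
      exact ⟨cx, hcxmem, cy, hcymem, rfl⟩
    · have heq : count_in cx cy a b M = count_in x y a b M := by
        apply count_in_congr
        intro f hf
        exact ⟨snap_indicator (mx - a) mx a 0 x cx M f hf hcxle (by omega) hcxmem (by omega) hcxmax,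
               snap_indicator (my - b) my b 1 y cy M f hf hcyle (by omega) hcymem (by omega) hcymax⟩
      omega

-- ===== VERDICT (by name: the statement is the Claim_ definition above) =====
theorem get_net_spec : Claim_equal_get_net := by
  intro m_i L prev_max_value M_list _ _
  unfold Spec_get_net get_net get_net_alt
  simp only []
  apply PySem.List.foldl_congr_mem
  intro mv l hl
  rw [PySem.List.mem_pyRange_one] at hl
  exact inner_eq (pvGetI m_i 0) (pvGetI m_i 1) l (PySem.Int.floordiv L 2 - l) M_list
    (by omega) (by omega) mv
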